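-- pv_equiv track=rewrite | github.com/MahjongRepository/mahjong-ai | project/betaori/model.py | tiles_34_to_sting_unsorted
-- ===== SOURCE A (Python) =====
-- def tiles_34_to_sting_unsorted(tiles):
--     string = ''
--     for tile in tiles:
--         if tile < 9:
--             string += str(tile + 1) + 'm'
--         elif 9 <= tile < 18:
--             string += str(tile - 9 + 1) + 'p'
--         elif 18 <= tile < 27:
--             string += str(tile - 18 + 1) + 's'
--         else:
--             string += str(tile - 27 + 1) + 'z'
--
--     return string
-- ===== SOURCE B (Python) =====
-- def tiles_34_to_sting_unsorted(tiles):
--     # Staged pipeline: suit group = how many suit boundaries (9, 18, 27) the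
--     # tile has passed; ranks and suit letters are built in separate passes,
--     # then zipped and joined.
--     groups = [sum(b <= t for b in (9, 18, 27)) for t in tiles]
--     ranks = [str(t - 9 * g + 1) for t, g in zip(tiles, groups)]
--     suits = ['mpsz'[g] for g in groups]
--     return ''.join(r + s for r, s in zip(ranks, suits))
-- ===== Notes on version B (the rewrite author's own statement) =====
-- stated objective: alternative
-- what changed: Replaces A's single accumulator loop with a four-way if/elif cascade and string += by a staged pipeline: suit groups computed by counting passed boundaries (9,18,27), then separate rank and suit-letter passes, zipped and joined once.
import Mathlib
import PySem

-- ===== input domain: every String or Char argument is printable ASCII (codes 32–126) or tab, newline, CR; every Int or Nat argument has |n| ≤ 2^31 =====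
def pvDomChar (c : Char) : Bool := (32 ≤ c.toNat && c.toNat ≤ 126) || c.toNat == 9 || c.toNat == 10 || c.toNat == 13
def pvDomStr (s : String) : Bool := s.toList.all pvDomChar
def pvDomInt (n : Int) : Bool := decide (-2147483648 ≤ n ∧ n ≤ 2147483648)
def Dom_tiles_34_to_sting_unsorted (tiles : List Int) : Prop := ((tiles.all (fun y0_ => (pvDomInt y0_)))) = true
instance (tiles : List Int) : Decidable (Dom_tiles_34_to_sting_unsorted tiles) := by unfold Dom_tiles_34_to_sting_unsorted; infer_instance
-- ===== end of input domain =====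

-- B is a staged pipeline: suit groups by counting passed boundaries (9,18,27), then separate rank and suit passes zipped and joined — instead of A's single accumulator loop with an if/elif cascade.


-- ===== PORT A =====
-- literal transliteration of A: accumulate the string (as its char list) through the if/elif cascade
def tiles_34_to_sting_unsorted (tiles : List Int) : String :=
  String.ofList (tiles.foldl (fun s tile =>
    if tile < 9 then s ++ PySem.Int.toChars (tile + 1) ++ ['m']
    else if 9 ≤ tile ∧ tile < 18 then s ++ PySem.Int.toChars (tile - 9 + 1) ++ ['p']
    else if 18 ≤ tile ∧ tile < 27 then s ++ PySem.Int.toChars (tile - 18 + 1) ++ ['s']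
    else s ++ PySem.Int.toChars (tile - 27 + 1) ++ ['z']) [])

-- ===== PORT B =====
-- staged passes: groups by boundary counting, then ranks and suits, zipped and joined; 'mpsz'[g] with g provably in 0..3, the getD default unreachable
def tiles_34_to_sting_unsorted_alt (tiles : List Int) : String :=
  let groups := tiles.map (fun t => ([9, 18, 27] : List Int).foldl (fun a b => if b ≤ t then a + 1 else a) 0)
  let ranks := (tiles.zip groups).map (fun p => PySem.Int.toChars (p.1 - 9 * p.2 + 1))
  let suits := groups.map (fun g => (PySem.List.pyGet? ['m', 'p', 's', 'z'] g).getD ' ')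
  String.ofList (((ranks.zip suits).map (fun p => p.1 ++ [p.2])).flatten)

-- ===== PRECONDITION & SPEC =====
def Spec_tiles_34_to_sting_unsorted (tiles : List Int) (out : String) : Prop := out = tiles_34_to_sting_unsorted_alt tiles
instance (tiles : List Int) (out : String) : Decidable (Spec_tiles_34_to_sting_unsorted tiles out) := by unfold Spec_tiles_34_to_sting_unsorted; infer_instance

-- ===== CLAIM (what is proved, stated in full; the proofs are below) =====
def Claim_equal_tiles_34_to_sting_unsorted : Prop := ∀ (tiles : List Int), Dom_tiles_34_to_sting_unsorted tiles → Spec_tiles_34_to_sting_unsorted tiles (tiles_34_to_sting_unsorted tiles)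

-- ===== LEMMAS AND PROOFS =====

-- A's piece for one tile, factored out of the foldl body
def pvPieceA (tile : Int) : List Char :=
  if tile < 9 then PySem.Int.toChars (tile + 1) ++ ['m']
  else if 9 ≤ tile ∧ tile < 18 then PySem.Int.toChars (tile - 9 + 1) ++ ['p']
  else if 18 ≤ tile ∧ tile < 27 then PySem.Int.toChars (tile - 18 + 1) ++ ['s']
  else PySem.Int.toChars (tile - 27 + 1) ++ ['z']

-- B's piece for one tile
def pvPieceB (tile : Int) : List Char :=
  let g : Int := ([9, 18, 27] : List Int).foldl (fun a b => if b ≤ tile then a + 1 else a) 0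
  PySem.Int.toChars (tile - 9 * g + 1) ++ [(PySem.List.pyGet? ['m', 'p', 's', 'z'] g).getD ' ']

theorem pvPiece_eq (tile : Int) : pvPieceA tile = pvPieceB tile := by
  simp only [pvPieceA, pvPieceB, List.foldl]
  split_ifs <;> (try (exfalso; omega)) <;>
    norm_num [PySem.List.pyGet?, PySem.List.pyIdx?] <;> (try ring_nf) <;> (try decide)

theorem pvFoldA (tiles : List Int) :
    tiles.foldl (fun s tile =>
      if tile < 9 then s ++ PySem.Int.toChars (tile + 1) ++ ['m']
      else if 9 ≤ tile ∧ tile < 18 then s ++ PySem.Int.toChars (tile - 9 + 1) ++ ['p']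
      else if 18 ≤ tile ∧ tile < 27 then s ++ PySem.Int.toChars (tile - 18 + 1) ++ ['s']
      else s ++ PySem.Int.toChars (tile - 27 + 1) ++ ['z']) [] = tiles.flatMap pvPieceA := by
  have hbody : (fun (s : List Char) (tile : Int) =>
      if tile < 9 then s ++ PySem.Int.toChars (tile + 1) ++ ['m']
      else if 9 ≤ tile ∧ tile < 18 then s ++ PySem.Int.toChars (tile - 9 + 1) ++ ['p']
      else if 18 ≤ tile ∧ tile < 27 then s ++ PySem.Int.toChars (tile - 18 + 1) ++ ['s']
      else s ++ PySem.Int.toChars (tile - 27 + 1) ++ ['z']) = fun s tile => s ++ pvPieceA tile := by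
    funext s tile
    unfold pvPieceA
    split_ifs <;> simp [List.append_assoc]
  rw [hbody, PySem.List.foldl_append_eq_flatMap]
  simp

theorem pvStaged (tiles : List Int) :
    (List.map (fun p : List Char × Char => p.1 ++ [p.2])
      ((List.map (fun p : Int × Int => PySem.Int.toChars (p.1 - 9 * p.2 + 1))
          (tiles.zip (tiles.map (fun t => ([9, 18, 27] : List Int).foldl (fun a b => if b ≤ t then a + 1 else a) 0)))).zip
        (List.map (fun g => (PySem.List.pyGet? ['m', 'p', 's', 'z'] g).getD ' ')
          (tiles.map (fun t => ([9, 18, 27] : List Int).foldl (fun a b => if b ≤ t then a + 1 else a) 0))))).flatten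
    = tiles.flatMap pvPieceB := by
  induction tiles with
  | nil => rfl
  | cons t rest ih =>
    simp only [List.map_cons, List.zip_cons_cons, List.flatten_cons, List.flatMap_cons, ih]
    rfl

theorem pvAltChar (tiles : List Int) :
    tiles_34_to_sting_unsorted_alt tiles = String.ofList (tiles.flatMap pvPieceB) :=
  congrArg String.ofList (pvStaged tiles)

-- ===== VERDICT (by name: the statement is the Claim_ definition above) =====
theorem tiles_34_to_sting_unsorted_spec : Claim_equal_tiles_34_to_sting_unsorted := by
  intro tiles _
  show tiles_34_to_sting_unsorted tiles = tiles_34_to_sting_unsorted_alt tiles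
  unfold tiles_34_to_sting_unsorted
  rw [pvFoldA, pvAltChar]
  congr 1
  simp only [List.flatMap_def]
  rw [List.map_congr_left (fun t _ => pvPiece_eq t)]
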